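-- pv_equiv track=rewrite | github.com/idleh4021/study-algorithm | Python3/프로그래머스/0/181881. 조건에 맞게 수열 변환하기 2/조건에 맞게 수열 변환하기 2.py | solution
-- ===== SOURCE A (Python) =====
-- def solution(arr):
--     x=0
--     x1 = arr
--     x2 = []
--     while(True):
--         x2 = [i//2 if i>=50 and i%2==0 else i*2+1 if i<50 and i%2==1 else i  for i in x1]
--         if(x1==x2) : break
--         else : x1=x2
--         x+=1
--     return x
-- ===== SOURCE B (Python) =====
-- def solution(arr):
--     # Two-phase per-element simulation: halve each big even element until it is
--     # odd or below 50, then (if it landed odd) double-and-add-one until it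
--     # reaches 50; the answer is the largest per-element step count.
--     best = 0
--     for v in arr:
--         c = 0
--         while v >= 50 and v % 2 == 0:
--             v //= 2
--             c += 1
--         if v % 2 == 1:
--             while 0 < v < 50:
--                 v = v * 2 + 1
--                 c += 1
--         if c > best:
--             best = c
--     return best
-- ===== Notes on version B (the rewrite author's own statement) =====
-- stated objective: alternative
-- what changed: Instead of repeatedly rebuilding the whole array and comparing it with the previous round until nothing changes, B processes each element once with two specialized loops (halve while >=50 and even, then double-and-add-one while positive and below 50) and returns the maximum per-element step count.
import Mathlib
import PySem

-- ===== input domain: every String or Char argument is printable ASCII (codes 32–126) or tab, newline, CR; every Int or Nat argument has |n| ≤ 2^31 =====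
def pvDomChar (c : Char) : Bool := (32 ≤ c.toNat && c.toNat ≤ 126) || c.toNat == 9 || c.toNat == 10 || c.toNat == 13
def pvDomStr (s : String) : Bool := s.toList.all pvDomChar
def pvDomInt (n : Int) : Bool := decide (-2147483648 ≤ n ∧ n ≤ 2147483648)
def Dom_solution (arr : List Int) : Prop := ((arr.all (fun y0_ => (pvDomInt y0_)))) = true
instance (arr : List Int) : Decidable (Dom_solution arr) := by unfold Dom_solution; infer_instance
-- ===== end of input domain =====

-- B replaces A's repeated whole-array rebuild-and-compare rounds by a two-phase
-- per-element simulation (halve while ≥50 and even, then double-and-add-one while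
-- positive and <50) and returns the maximum per-element step count (objective: alternative).

-- ===== PORT A =====
-- A's `while True` loop, made total with fuel (64 always suffices on Dom ∩ Pre_);
-- each round maps the whole list and compares it with the previous one, like the Python.
def solutionLoopA : Nat → Int → List Int → Int
  | 0, x, _ => x
  | fuel+1, x, x1 =>
    let x2 := x1.map (fun i =>
      if i ≥ 50 ∧ PySem.Int.mod i 2 = 0 then PySem.Int.floordiv i 2
      else if i < 50 ∧ PySem.Int.mod i 2 = 1 then i * 2 + 1 else i)
    if x1 = x2 then x else solutionLoopA fuel (x + 1) x2

def solution (arr : List Int) : Int := solutionLoopA 64 0 arr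

-- ===== PORT B =====
-- B's first inner loop: `while v >= 50 and v % 2 == 0: v //= 2; c += 1` (fueled)
def halveB : Nat → Int → Int → Int × Int
  | 0, v, c => (v, c)
  | fuel+1, v, c =>
    if 50 ≤ v ∧ PySem.Int.mod v 2 = 0 then halveB fuel (PySem.Int.floordiv v 2) (c + 1)
    else (v, c)

-- B's second inner loop: `while 0 < v < 50: v = v*2 + 1; c += 1` (fueled)
def doubleB : Nat → Int → Int → Int
  | 0, _, c => c
  | fuel+1, v, c => if 0 < v ∧ v < 50 then doubleB fuel (v * 2 + 1) (c + 1) else c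

def solution_alt (arr : List Int) : Int :=
  arr.foldl (fun best v =>
    let p := halveB 64 v 0
    let c := if PySem.Int.mod p.1 2 = 1 then doubleB 64 p.1 p.2 else p.2
    if best < c then c else best) 0

-- ===== PRECONDITION & SPEC =====
-- Pre_ excludes arrays containing an odd element < -1: there A's while-loop never
-- terminates (the element keeps strictly decreasing), so A returns on no such input.
def Pre_solution (arr : List Int) : Prop :=
  ∀ v ∈ arr, ¬ (PySem.Int.mod v 2 = 1 ∧ v < -1)
instance (arr : List Int) : Decidable (Pre_solution arr) := by unfold Pre_solution; infer_instance
def pvWitness_solution : List Int := [100, 3]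

def Spec_solution (arr : List Int) (out : Int) : Prop := out = solution_alt arr
instance (arr : List Int) (out : Int) : Decidable (Spec_solution arr out) := by unfold Spec_solution; infer_instance

-- ===== CLAIM (what is proved, stated in full; the proofs are below) =====
def Claim_equal_solution : Prop := ∀ (arr : List Int), Dom_solution arr → Pre_solution arr → Spec_solution arr (solution arr)

-- ===== LEMMAS AND PROOFS =====

-- the per-element transform of A, for the proofs
def pvF (i : Int) : Int :=
  if i ≥ 50 ∧ PySem.Int.mod i 2 = 0 then PySem.Int.floordiv i 2
  else if i < 50 ∧ PySem.Int.mod i 2 = 1 then i * 2 + 1 else i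

-- proof-side bridge: per-element steps of A's dynamics, with shared fuel
def stepsGen : Nat → Int → Int → Int
  | 0, _, c => c
  | fuel+1, i, c => if pvF i = i then c else stepsGen fuel (pvF i) (c + 1)

lemma stepsGen_succ (fuel : Nat) (i c : Int) :
    stepsGen (fuel + 1) i c = if pvF i = i then c else stepsGen fuel (pvF i) (c + 1) := rfl

lemma solutionLoopA_succ (fuel : Nat) (x : Int) (x1 : List Int) :
    solutionLoopA (fuel + 1) x x1 =
      if x1 = x1.map pvF then x else solutionLoopA fuel (x + 1) (x1.map pvF) := rfl

lemma pv_map_fix_iff (f : Int → Int) : ∀ l : List Int, l.map f = l ↔ ∀ x ∈ l, f x = x := by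
  intro l
  induction l with
  | nil => simp
  | cons y t ih => simp [List.map, ih]

lemma foldl_max_acc (l : List Int) : ∀ a b : Int, l.foldl max (max a b) = max a (l.foldl max b) := by
  induction l with
  | nil => intro a b; simp
  | cons y t ih => intro a b; simpa [List.foldl, max_assoc] using ih a (max b y)

lemma foldl_max_cons (y : Int) (t : List Int) :
    (y :: t).foldl max 0 = max y (t.foldl max 0) := by
  have h := foldl_max_acc t y 0
  simp only [List.foldl]
  rw [max_comm 0 y, h]

lemma foldl_max_zero (l : List Int) (h : ∀ i ∈ l, i = 0) : l.foldl max 0 = 0 := by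
  induction l with
  | nil => rfl
  | cons y t ih =>
    rw [foldl_max_cons, h y (by simp), ih (fun i hi => h i (by simp [hi]))]
    simp

lemma foldl_max_nonneg (l : List Int) : 0 ≤ l.foldl max 0 := by
  induction l with
  | nil => simp
  | cons y t ih => rw [foldl_max_cons]; exact le_trans ih (le_max_right _ _)

lemma stepsGen_shift (fuel : Nat) : ∀ i c, stepsGen fuel i c = c + stepsGen fuel i 0 := by
  induction fuel with
  | zero => intro i c; simp [stepsGen]
  | succ fuel ih =>
    intro i c
    rw [stepsGen_succ, stepsGen_succ]
    by_cases h : pvF i = i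
    · rw [if_pos h, if_pos h]; omega
    · rw [if_neg h, if_neg h, ih (pvF i) (c + 1), ih (pvF i) (0 + 1)]; ring

lemma stepsGen_fix (fuel : Nat) (i : Int) (h : pvF i = i) : stepsGen fuel i 0 = 0 := by
  cases fuel with
  | zero => rfl
  | succ fuel => rw [stepsGen_succ, if_pos h]

lemma stepsGen_nonneg (fuel : Nat) : ∀ i, 0 ≤ stepsGen fuel i 0 := by
  induction fuel with
  | zero => intro i; simp [stepsGen]
  | succ fuel ih =>
    intro i
    rw [stepsGen_succ]
    by_cases h : pvF i = i
    · rw [if_pos h]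
    · rw [if_neg h, stepsGen_shift]; have := ih (pvF i); omega

lemma loopA_shift (fuel : Nat) : ∀ l x, solutionLoopA fuel x l = x + solutionLoopA fuel 0 l := by
  induction fuel with
  | zero => intro l x; simp [solutionLoopA]
  | succ fuel ih =>
    intro l x
    rw [solutionLoopA_succ, solutionLoopA_succ]
    by_cases h : l = l.map pvF
    · rw [if_pos h, if_pos h]; omega
    · rw [if_neg h, if_neg h, ih (l.map pvF) (x + 1), ih (l.map pvF) (0 + 1)]; ring

lemma foldl_max_lift (h : Int → Int) (p : Int → Prop) [DecidablePred p]
    (hnn : ∀ i, 0 ≤ h i) (hz : ∀ i, p i → h i = 0) :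
    ∀ l : List Int, (∃ i ∈ l, ¬ p i) →
      (l.map (fun i => if p i then 0 else 1 + h i)).foldl max 0 = 1 + (l.map h).foldl max 0 := by
  intro l
  induction l with
  | nil => rintro ⟨i, hi, -⟩; cases hi
  | cons y t ih =>
    rintro ⟨i, hi, hnp⟩
    simp only [List.map, foldl_max_cons]
    by_cases hpy : p y
    · have hit : i ∈ t := by
        rcases List.mem_cons.mp hi with rfl | hit
        · exact absurd hpy hnp
        · exact hit
      rw [ih ⟨i, hit, hnp⟩]
      rw [if_pos hpy, hz y hpy]
      have h1 : 0 ≤ (t.map h).foldl max 0 := foldl_max_nonneg _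
      have h2 : (0:Int) ≤ 1 + (t.map h).foldl max 0 := by omega
      rw [max_eq_right h2, max_eq_right h1]
    · rw [if_neg hpy]
      by_cases het : ∃ j ∈ t, ¬ p j
      · rw [ih het]
        exact max_add_add_left 1 _ _
      · have hallz : ∀ j ∈ t, p j := by
          intro j hj; by_contra hc; exact het ⟨j, hj, hc⟩
        have e1 : (t.map (fun i => if p i then 0 else 1 + h i)).foldl max 0 = 0 := by
          apply foldl_max_zero
          intro v hv
          rcases List.mem_map.mp hv with ⟨j, hj, rfl⟩
          rw [if_pos (hallz j hj)]
        have e2 : (t.map h).foldl max 0 = 0 := by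
          apply foldl_max_zero
          intro v hv
          rcases List.mem_map.mp hv with ⟨j, hj, rfl⟩
          exact hz j (hallz j hj)
        rw [e1, e2]
        have hhy := hnn y
        rw [max_eq_left (by omega), max_eq_left hhy]

lemma main_eq (fuel : Nat) : ∀ l : List Int,
    solutionLoopA fuel 0 l = (l.map (fun i => stepsGen fuel i 0)).foldl max 0 := by
  induction fuel with
  | zero =>
    intro l
    simp only [solutionLoopA, stepsGen]
    rw [foldl_max_zero]
    intro v hv
    rcases List.mem_map.mp hv with ⟨j, _, rfl⟩
    rfl
  | succ fuel ih =>
    intro l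
    rw [solutionLoopA_succ]
    by_cases hfix : l = l.map pvF
    · rw [if_pos hfix]
      have hall : ∀ i ∈ l, pvF i = i := (pv_map_fix_iff pvF l).mp hfix.symm
      rw [foldl_max_zero]
      intro v hv
      rcases List.mem_map.mp hv with ⟨j, hj, rfl⟩
      exact stepsGen_fix (fuel + 1) j (hall j hj)
    · rw [if_neg hfix]
      rw [loopA_shift, ih (l.map pvF), List.map_map]
      have hex : ∃ i ∈ l, ¬ pvF i = i := by
        by_contra hc
        push Not at hc
        exact hfix ((pv_map_fix_iff pvF l).mpr hc).symm
      have hrhs : (l.map (fun i => stepsGen (fuel + 1) i 0)) =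
          l.map (fun i => if pvF i = i then 0 else 1 + stepsGen fuel (pvF i) 0) := by
        apply List.map_congr_left
        intro j _
        rw [stepsGen_succ]
        by_cases hj : pvF j = j
        · rw [if_pos hj, if_pos hj]
        · rw [if_neg hj, if_neg hj, stepsGen_shift]; ring
      rw [hrhs,
        foldl_max_lift (fun i => stepsGen fuel (pvF i) 0) (fun i => pvF i = i)
          (fun i => stepsGen_nonneg fuel (pvF i))
          (fun i hi => by simp only [show pvF i = i from hi]; exact stepsGen_fix fuel i hi) l hex]
      rfl

-- ========= new per-element lemmas relating stepsGen to B's two loops =========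

lemma pv_mod2 (v : Int) : PySem.Int.mod v 2 = v % 2 :=
  PySem.Int.mod_eq_emod_of_pos (by omega)

lemma pv_div2 (v : Int) : PySem.Int.floordiv v 2 = v / 2 :=
  PySem.Int.floordiv_eq_ediv_of_pos (by omega)

-- B's doubling loop does not see its fuel once the fuel is large enough
lemma doubleB_stable : ∀ fuel (v c : Int), 0 < v → 51 ≤ (v + 1) * 2 ^ fuel →
    doubleB (fuel + 1) v c = doubleB fuel v c := by
  intro fuel
  induction fuel with
  | zero =>
    intro v c hv hb
    simp only [pow_zero, mul_one] at hb
    simp [doubleB, show ¬ (0 < v ∧ v < 50) by omega]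
  | succ fuel ih =>
    intro v c hv hb
    by_cases h : 0 < v ∧ v < 50
    · show (if 0 < v ∧ v < 50 then doubleB (fuel + 1) (v * 2 + 1) (c + 1) else c) =
        (if 0 < v ∧ v < 50 then doubleB fuel (v * 2 + 1) (c + 1) else c)
      rw [if_pos h, if_pos h]
      apply ih _ _ (by omega)
      have : (v * 2 + 1 + 1) * 2 ^ fuel = (v + 1) * 2 ^ (fuel + 1) := by ring
      omega
    · show (if 0 < v ∧ v < 50 then doubleB (fuel + 1) (v * 2 + 1) (c + 1) else c) =
        (if 0 < v ∧ v < 50 then doubleB fuel (v * 2 + 1) (c + 1) else c)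
      rw [if_neg h, if_neg h]

lemma doubleB_add (k : Nat) : ∀ fuel (v c : Int), 0 < v → 51 ≤ (v + 1) * 2 ^ fuel →
    doubleB (fuel + k) v c = doubleB fuel v c := by
  induction k with
  | zero => intro fuel v c _ _; rfl
  | succ k ih =>
    intro fuel v c hv hb
    have h1 : 51 ≤ (v + 1) * 2 ^ (fuel + k) := by
      have hle : (2:Int) ^ fuel ≤ 2 ^ (fuel + k) := by
        apply pow_le_pow_right₀ (by omega) (by omega)
      nlinarith
    calc doubleB (fuel + (k + 1)) v c = doubleB ((fuel + k) + 1) v c := by ring_nf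
      _ = doubleB (fuel + k) v c := doubleB_stable (fuel + k) v c hv h1
      _ = doubleB fuel v c := ih fuel v c hv hb

lemma doubleB_any_fuel (m n : Nat) (v c : Int) (hv : 0 < v) (hm : 6 ≤ m) (hn : 6 ≤ n) :
    doubleB m v c = doubleB n v c := by
  have hb : (51:Int) ≤ (v + 1) * 2 ^ 6 := by norm_num; omega
  have em : doubleB m v c = doubleB 6 v c := by
    have : m = 6 + (m - 6) := by omega
    rw [this]; exact doubleB_add (m - 6) 6 v c hv hb
  have en : doubleB n v c = doubleB 6 v c := by
    have : n = 6 + (n - 6) := by omega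
    rw [this]; exact doubleB_add (n - 6) 6 v c hv hb
  rw [em, en]

-- in the doubling regime (odd, positive) A's per-element dynamics is B's doubling loop
lemma stepsGen_eq_doubleB : ∀ fuel (v c : Int), 1 ≤ v → PySem.Int.mod v 2 = 1 →
    stepsGen fuel v c = doubleB fuel v c := by
  intro fuel
  induction fuel with
  | zero => intro v c _ _; rfl
  | succ fuel ih =>
    intro v c hv hodd
    rw [pv_mod2] at hodd
    by_cases h : v < 50
    · have hF : pvF v = v * 2 + 1 := by
        unfold pvF
        rw [if_neg (by rw [pv_mod2]; omega), if_pos ⟨h, by rw [pv_mod2]; omega⟩]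
      rw [stepsGen_succ, hF, if_neg (by omega)]
      show _ = (if 0 < v ∧ v < 50 then doubleB fuel (v * 2 + 1) (c + 1) else c)
      rw [if_pos ⟨by omega, h⟩]
      exact ih _ _ (by omega) (by rw [pv_mod2]; omega)
    · have hF : pvF v = v := by
        unfold pvF
        rw [if_neg (by rw [pv_mod2]; omega), if_neg (by omega)]
      rw [stepsGen_succ, if_pos hF]
      show _ = (if 0 < v ∧ v < 50 then doubleB fuel (v * 2 + 1) (c + 1) else c)
      rw [if_neg (by omega)]

lemma halveB_fst_nonneg : ∀ fuel (v c : Int), 0 ≤ v → 0 ≤ (halveB fuel v c).1 := by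
  intro fuel
  induction fuel with
  | zero => intro v c hv; exact hv
  | succ fuel ih =>
    intro v c hv
    by_cases h : 50 ≤ v ∧ PySem.Int.mod v 2 = 0
    · show (if 50 ≤ v ∧ PySem.Int.mod v 2 = 0 then halveB fuel (PySem.Int.floordiv v 2) (c+1) else (v, c)).1 ≥ 0
      rw [if_pos h]
      exact ih _ _ (by rw [pv_div2]; omega)
    · show (if 50 ≤ v ∧ PySem.Int.mod v 2 = 0 then halveB fuel (PySem.Int.floordiv v 2) (c+1) else (v, c)).1 ≥ 0
      rw [if_neg h]
      exact hv

-- main correspondence: stepsGen with fuel+6 equals B's two-phase computation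
lemma main_elem : ∀ fuel (v c : Int), 0 ≤ v → v < 50 * 2 ^ fuel →
    stepsGen (fuel + 6) v c =
      (let p := halveB (fuel + 6) v c
       if PySem.Int.mod p.1 2 = 1 then doubleB (fuel + 6) p.1 p.2 else p.2) := by
  intro fuel
  induction fuel with
  | zero =>
    intro v c hv hb
    simp only [pow_zero, mul_one] at hb
    have hh : halveB (0 + 6) v c = (v, c) := by
      show (if 50 ≤ v ∧ PySem.Int.mod v 2 = 0 then _ else (v, c)) = (v, c)
      rw [if_neg (by omega)]
    simp only [hh]
    by_cases hodd : PySem.Int.mod v 2 = 1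
    · rw [if_pos hodd]
      have hv1 : 1 ≤ v := by rw [pv_mod2] at hodd; omega
      exact stepsGen_eq_doubleB _ v c hv1 hodd
    · rw [if_neg hodd]
      have hF : pvF v = v := by
        unfold pvF
        rw [if_neg (by omega), if_neg (by intro h; exact hodd h.2)]
      show (if pvF v = v then c else _) = c
      rw [if_pos hF]
  | succ fuel ih =>
    intro v c hv hb
    have hp : (0:Int) < 2 ^ fuel := by positivity
    have hpows : (50:Int) * 2 ^ (fuel + 1) = 2 * (50 * 2 ^ fuel) := by ring
    by_cases hg : 50 ≤ v ∧ PySem.Int.mod v 2 = 0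
    · -- one halving step on both sides
      have hmod : v % 2 = 0 := by rw [pv_mod2] at hg; exact hg.2
      have hF : pvF v = v / 2 := by
        unfold pvF
        rw [if_pos ⟨by omega, hg.2⟩, pv_div2]
      have hFne : pvF v ≠ v := by rw [hF]; omega
      have hstep : stepsGen (fuel + 1 + 6) v c = stepsGen (fuel + 6) (v / 2) (c + 1) := by
        show (if pvF v = v then c else stepsGen (fuel + 6) (pvF v) (c + 1)) = _
        rw [if_neg hFne, hF]
      have hhalve : halveB (fuel + 1 + 6) v c = halveB (fuel + 6) (v / 2) (c + 1) := by
        show (if 50 ≤ v ∧ PySem.Int.mod v 2 = 0 then halveB (fuel + 6) (PySem.Int.floordiv v 2) (c+1) else (v, c)) = _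
        rw [if_pos hg, pv_div2]
      have hdb : 0 ≤ v / 2 := by omega
      have hbb : v / 2 < 50 * 2 ^ fuel := by omega
      rw [hstep, hhalve, ih (v / 2) (c + 1) hdb hbb]
      simp only []
      set p := halveB (fuel + 6) (v / 2) (c + 1) with hpdef
      by_cases hodd : PySem.Int.mod p.1 2 = 1
      · rw [if_pos hodd, if_pos hodd]
        have hp1 : 0 < p.1 := by
          have h0 : 0 ≤ p.1 := halveB_fst_nonneg (fuel + 6) (v / 2) (c + 1) hdb
          rw [pv_mod2] at hodd; omega
        exact doubleB_any_fuel (fuel + 6) (fuel + 1 + 6) p.1 p.2 hp1 (by omega) (by omega)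
      · rw [if_neg hodd, if_neg hodd]
    · -- no halving: same as the base case
      have hh : halveB (fuel + 1 + 6) v c = (v, c) := by
        show (if 50 ≤ v ∧ PySem.Int.mod v 2 = 0 then _ else (v, c)) = (v, c)
        rw [if_neg hg]
      simp only [hh]
      by_cases hodd : PySem.Int.mod v 2 = 1
      · rw [if_pos hodd]
        have hv1 : 1 ≤ v := by rw [pv_mod2] at hodd; omega
        exact stepsGen_eq_doubleB _ v c hv1 hodd
      · rw [if_neg hodd]
        have hm0 : v % 2 = 0 := by rw [pv_mod2] at hodd; omega
        have hlt : v < 50 := by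
          by_contra hge
          exact hg ⟨by omega, by rw [pv_mod2]; omega⟩
        have hF : pvF v = v := by
          unfold pvF
          rw [if_neg (by omega), if_neg (by intro h; exact hodd h.2)]
        show (if pvF v = v then c else _) = c
        rw [if_pos hF]

-- B's per-element value, as the proofs see it
def elemBv (v : Int) : Int :=
  let p := halveB 64 v 0
  if PySem.Int.mod p.1 2 = 1 then doubleB 64 p.1 p.2 else p.2

lemma elemB_correct (v : Int) (hlo : -2147483648 ≤ v) (hhi : v ≤ 2147483648)
    (hpre : ¬ (PySem.Int.mod v 2 = 1 ∧ v < -1)) :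
    stepsGen 64 v 0 = elemBv v := by
  by_cases hneg : v < 0
  · -- negative elements are fixed points for both programs
    by_cases hodd : PySem.Int.mod v 2 = 1
    · have hge : ¬ (v < -1) := fun h => hpre ⟨hodd, h⟩
      have hv : v = -1 := by omega
      subst hv
      have hF : pvF (-1) = -1 := by
        unfold pvF
        rw [if_neg (by omega), if_pos ⟨by omega, hodd⟩]
        norm_num
      have hl : stepsGen 64 (-1 : Int) 0 = 0 := stepsGen_fix 64 _ hF
      have hh : halveB 64 (-1 : Int) 0 = (-1, 0) := by
        show (if 50 ≤ (-1:Int) ∧ _ then _ else ((-1:Int), (0:Int))) = _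
        rw [if_neg (by omega)]
      unfold elemBv
      rw [hh, hl]
      simp only [if_pos hodd]
      show (0:Int) = (if (0:Int) < -1 ∧ (-1:Int) < 50 then _ else (0:Int))
      rw [if_neg (by omega)]
    · have hF : pvF v = v := by
        unfold pvF
        rw [if_neg (by omega), if_neg (by intro h; exact hodd h.2)]
      have hl : stepsGen 64 v 0 = 0 := stepsGen_fix 64 _ hF
      have hh : halveB 64 v 0 = (v, 0) := by
        show (if 50 ≤ v ∧ _ then _ else (v, (0:Int))) = _
        rw [if_neg (by omega)]
      unfold elemBv
      rw [hh, hl, if_neg hodd]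
  · -- nonnegative: the two-phase correspondence at fuel 58 + 6 = 64
    have hb : v < 50 * 2 ^ 58 := by norm_num; omega
    have h := main_elem 58 v 0 (by omega) hb
    unfold elemBv
    exact h

lemma fold_if_max (g : Int → Int) : ∀ (l : List Int) (acc : Int),
    l.foldl (fun best v => if best < g v then g v else best) acc = (l.map g).foldl max acc := by
  intro l
  induction l with
  | nil => intro acc; rfl
  | cons y t ih =>
    intro acc
    simp only [List.foldl, List.map]
    rw [ih]
    congr 1
    rcases lt_or_ge acc (g y) with h | h
    · rw [if_pos h, max_eq_right (by omega)]
    · rw [if_neg (by omega), max_eq_left h]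

lemma solution_alt_eq (arr : List Int) :
    solution_alt arr = (arr.map elemBv).foldl max 0 := by
  unfold solution_alt
  exact fold_if_max elemBv arr 0

-- ===== VERDICT (by name: the statement is the Claim_ definition above) =====
theorem solution_spec : Claim_equal_solution := by
  intro arr hdom hpre
  show solution arr = solution_alt arr
  have hdom' : ∀ v ∈ arr, -2147483648 ≤ v ∧ v ≤ 2147483648 := by
    intro v hv
    have := List.all_eq_true.mp hdom v hv
    simpa [pvDomInt] using this
  show solutionLoopA 64 0 arr = _
  rw [main_eq 64 arr, solution_alt_eq]
  congr 1
  apply List.map_congr_left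
  intro v hv
  exact elemB_correct v (hdom' v hv).1 (hdom' v hv).2 (hpre v hv)
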